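-- pv_equiv track=rewrite | github.com/mattgonzalesced/CED_Extensions | AE pyTools.extension/AE pyTools.Tab/MEP Automation.panel/Audit Tools.pulldown/Audit CAD Model.pushbutton/script.py | _collapse_acronym_tokens
-- ===== SOURCE A (Python) =====
-- def _collapse_acronym_tokens(tokens):
--     collapsed = []
--     letters = []
--     for token in tokens or []:
--         if len(token) == 1 and token.isalpha():
--             letters.append(token)
--             continue
--         if letters:
--             if len(letters) > 1:
--                 collapsed.append("".join(letters))
--             else:
--                 collapsed.extend(letters)
--             letters = []
--         collapsed.append(token)
--     if letters:
--         if len(letters) > 1: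
--             collapsed.append("".join(letters))
--         else:
--             collapsed.extend(letters)
--     return collapsed
-- ===== SOURCE B (Python) =====
-- def _collapse_acronym_tokens(tokens):
--     toks = list(tokens or [])
--     n = len(toks)
--     out = []
--     i = 0
--     while i < n:
--         t = toks[i]
--         if not (len(t) == 1 and t.isalpha()):
--             out.append(t)
--             i += 1
--             continue
--         j = i + 1
--         while j < n and len(toks[j]) == 1 and toks[j].isalpha():
--             j += 1
--         out.append("".join(toks[i:j]) if j - i > 1 else t)
--         i = j
--     return out
-- ===== Notes on version B (the rewrite author's own statement) =====
-- stated objective: alternative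
-- what changed: B walks the list segment-at-a-time with an index cursor: each outer step emits either one non-letter token or a whole maximal single-letter run found by an inner scan, so A's pending-letters buffer and its duplicated post-loop flush disappear.
import Mathlib
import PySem

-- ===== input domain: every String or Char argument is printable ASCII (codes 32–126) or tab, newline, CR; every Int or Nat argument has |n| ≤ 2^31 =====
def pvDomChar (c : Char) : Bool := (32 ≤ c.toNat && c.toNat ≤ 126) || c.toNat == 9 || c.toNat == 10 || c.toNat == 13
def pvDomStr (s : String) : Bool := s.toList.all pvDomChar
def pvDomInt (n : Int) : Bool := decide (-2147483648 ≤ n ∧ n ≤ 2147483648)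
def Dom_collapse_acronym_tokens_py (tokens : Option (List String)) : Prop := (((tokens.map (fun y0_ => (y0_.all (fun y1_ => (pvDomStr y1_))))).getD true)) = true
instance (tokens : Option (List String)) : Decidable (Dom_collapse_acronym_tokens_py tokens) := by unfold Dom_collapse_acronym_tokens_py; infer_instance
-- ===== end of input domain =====

-- B replaces A's stateful loop (letters buffer + duplicated post-loop flush) by a
-- segment-at-a-time cursor walk: each outer step emits one non-letter token or a
-- whole maximal single-letter run; same O(n) cost, different decomposition.

-- Python's `len(t) == 1 and t.isalpha()` (appears in both sources)
def pvP (t : String) : Bool := (PySem.Str.len t == 1) && PySem.Str.strIsalpha t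

-- ===== PORT A =====
-- one step of A's `for token in tokens or []:` over state (collapsed, letters)
def pvStepA (st : List String × List String) (token : String) : List String × List String :=
  if pvP token then
    (st.1, st.2 ++ [token])
  else
    let c := if st.2 ≠ [] then
               (if st.2.length > 1 then st.1 ++ [PySem.Str.join "" st.2] else st.1 ++ st.2)
             else st.1
    (c ++ [token], [])

-- A's post-loop flush of the pending letters
def pvFinA (st : List String × List String) : List String :=
  if st.2 ≠ [] then
    (if st.2.length > 1 then st.1 ++ [PySem.Str.join "" st.2] else st.1 ++ st.2)
  else st.1

def collapse_acronym_tokens_py (tokens : Option (List String)) : List String :=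
  pvFinA ((tokens.getD []).foldl pvStepA ([], []))

-- ===== PORT B =====
-- B's outer `while i < n` becomes recursion on the suffix `toks[i:]`; the inner
-- `while` that advances `j` over the letter run is the takeWhile, and `i = j`
-- continues on the dropWhile remainder.
def pvRecB : List String → List String
  | [] => []
  | t :: ts =>
    if !pvP t then t :: pvRecB ts
    else
      let run := ts.takeWhile pvP
      (if run.length + 1 > 1 then [PySem.Str.join "" (t :: run)] else [t]) ++
        pvRecB (ts.dropWhile pvP)
termination_by ts => ts.length
decreasing_by
  · simp
  · simpa using Nat.lt_succ_of_le (List.length_dropWhile_le _ _)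

def collapse_acronym_tokens_py_alt (tokens : Option (List String)) : List String :=
  pvRecB (tokens.getD [])

-- ===== PRECONDITION & SPEC =====
def Spec_collapse_acronym_tokens_py (tokens : Option (List String)) (out : List String) : Prop := out = collapse_acronym_tokens_py_alt tokens
instance (tokens : Option (List String)) (out : List String) : Decidable (Spec_collapse_acronym_tokens_py tokens out) := by unfold Spec_collapse_acronym_tokens_py; infer_instance

-- ===== CLAIM (what is proved, stated in full; the proofs are below) =====
def Claim_equal_collapse_acronym_tokens_py : Prop := ∀ (tokens : Option (List String)), Dom_collapse_acronym_tokens_py tokens → Spec_collapse_acronym_tokens_py tokens (collapse_acronym_tokens_py tokens)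

-- ===== LEMMAS AND PROOFS =====

-- flushing a pending letter run
def pvFlush (l : List String) : List String :=
  if l = [] then [] else if l.length > 1 then [PySem.Str.join "" l] else l

-- recursive characterisation of A's collapse with pending letters l
def pvR : List String → List String → List String
  | l, [] => pvFlush l
  | l, t :: ts => if pvP t then pvR (l ++ [t]) ts else pvFlush l ++ t :: pvR [] ts

lemma pvFinA_eq (c l : List String) : pvFinA (c, l) = c ++ pvFlush l := by
  simp only [pvFinA, pvFlush]
  split_ifs <;> simp_all

lemma foldA_eq (ts : List String) : ∀ c l : List String,
    pvFinA (ts.foldl pvStepA (c, l)) = c ++ pvR l ts := by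
  induction ts with
  | nil => intro c l; simpa [pvR] using pvFinA_eq c l
  | cons t ts ih =>
    intro c l
    by_cases hp : pvP t
    · simp only [List.foldl_cons, pvStepA, hp, if_pos]
      rw [ih]
      simp [pvR, hp]
    · have hc : (if l ≠ [] then
          (if l.length > 1 then c ++ [PySem.Str.join "" l] else c ++ l) else c)
          = c ++ pvFlush l := by
        simp only [pvFlush]; split_ifs <;> simp_all
      simp only [List.foldl_cons, pvStepA, hp, if_neg, Bool.false_eq_true, not_false_iff]
      rw [hc, ih]
      simp [pvR, hp, List.append_assoc]

lemma pvR_take (tw : List String) : ∀ (l rest : List String),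
    (∀ x ∈ tw, pvP x = true) → pvR l (tw ++ rest) = pvR (l ++ tw) rest := by
  induction tw with
  | nil => intro l rest _; simp
  | cons t tw ih =>
    intro l rest h
    have hp : pvP t = true := h t (by simp)
    simp only [List.cons_append, pvR, hp, if_pos]
    rw [ih _ _ (fun x hx => h x (by simp [hx]))]
    simp

-- after a nonempty letter run, A flushes it and restarts with empty pending letters
lemma pvR_flush (l ts : List String) (hts : ts = [] ∨ ∃ d ds, ts = d :: ds ∧ pvP d = false) :
    pvR l ts = pvFlush l ++ pvR [] ts := by
  rcases hts with h | ⟨d, ds, h, hd⟩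
  · subst h; simp [pvR, pvFlush]
  · subst h; simp [pvR, hd, pvFlush]

theorem pvMainB : ∀ ts : List String, pvRecB ts = pvR [] ts
  | [] => by simp [pvRecB, pvR, pvFlush]
  | t :: ts => by
    rw [pvRecB]
    cases hp : pvP t with
    | false =>
      simp only [Bool.not_false, if_pos]
      rw [pvMainB ts]
      simp [pvR, hp, pvFlush]
    | true =>
      simp only [Bool.not_true, Bool.false_eq_true, if_neg, not_false_iff]
      have hsplit := List.takeWhile_append_dropWhile (p := pvP) (l := ts)
      have htw : ∀ x ∈ ts.takeWhile pvP, pvP x = true := by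
        intro x hx; simpa using List.mem_takeWhile_imp hx
      have hdw : ts.dropWhile pvP = [] ∨
          ∃ d ds, ts.dropWhile pvP = d :: ds ∧ pvP d = false := by
        cases h : ts.dropWhile pvP with
        | nil => exact Or.inl rfl
        | cons d ds =>
          refine Or.inr ⟨d, ds, rfl, ?_⟩
          have h0 : 0 < (ts.dropWhile pvP).length := by rw [h]; simp
          have h2 := List.dropWhile_get_zero_not (p := pvP) ts h0
          simp only [List.get_eq_getElem, h] at h2
          simpa using h2
      have ih := pvMainB (ts.dropWhile pvP)
      conv_rhs => rw [pvR, if_pos hp, ← hsplit]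
      have ht := pvR_take (ts.takeWhile pvP) [t] (ts.dropWhile pvP) htw
      simp only [List.nil_append]
      rw [ht]
      rw [pvR_flush _ _ hdw, ← ih]
      have hflush : pvFlush (t :: ts.takeWhile pvP)
          = if (ts.takeWhile pvP).length + 1 > 1 then
              [PySem.Str.join "" (t :: ts.takeWhile pvP)] else [t] := by
        cases h : ts.takeWhile pvP with
        | nil => simp [pvFlush]
        | cons a as => simp [pvFlush]
      rw [← hflush]
      simp
  termination_by ts => ts.length
  decreasing_by
    · simp
    · simpa using Nat.lt_succ_of_le (List.length_dropWhile_le _ _)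

-- ===== VERDICT (by name: the statement is the Claim_ definition above) =====
theorem collapse_acronym_tokens_py_spec : Claim_equal_collapse_acronym_tokens_py := by
  intro tokens _
  unfold Spec_collapse_acronym_tokens_py collapse_acronym_tokens_py collapse_acronym_tokens_py_alt
  rw [pvMainB]
  simpa using foldA_eq (tokens.getD []) [] []
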